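-- pv_equiv track=rewrite | github.com/amro-coder/A2SV | 2100-find-good-days-to-rob-the-bank/2100-find-good-days-to-rob-the-bank.py | goodDaysToRobBank
-- ===== SOURCE A (Python) =====
-- from typing import List
--
-- def goodDaysToRobBank(security: List[int], time: int) -> List[int]:
--     left,right=[0]*len(security),[0]*len(security)
--     for i in range(1,len(security)):
--         if security[i]<=security[i-1]:
--             left[i]=left[i-1]+1
--     for i in range(len(security)-2,-1,-1):
--         if security[i]<=security[i+1]:
--             right[i]=right[i+1]+1
--     return [i for i in range(len(security)) if left[i]>=time and right[i]>=time]
-- ===== SOURCE B (Python) =====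
-- from typing import List
--
-- def goodDaysToRobBank(security: List[int], time: int) -> List[int]:
--     n = len(security)
--     if time <= 0:
--         return list(range(n))
--     return [
--         i
--         for i in range(time, n - time)
--         if all(security[j] <= security[j - 1] for j in range(i - time + 1, i + 1))
--         and all(security[j] <= security[j + 1] for j in range(i, i + time))
--     ]
-- ===== Notes on version B (the rewrite author's own statement) =====
-- stated objective: simpler
-- what changed: B drops A's two precomputed run-length prefix/suffix tables and instead checks each candidate day directly by scanning its two length-time windows (with a trivial all-days answer for time <= 0), restricting candidates to range(time, n-time).
import Mathlib
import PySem

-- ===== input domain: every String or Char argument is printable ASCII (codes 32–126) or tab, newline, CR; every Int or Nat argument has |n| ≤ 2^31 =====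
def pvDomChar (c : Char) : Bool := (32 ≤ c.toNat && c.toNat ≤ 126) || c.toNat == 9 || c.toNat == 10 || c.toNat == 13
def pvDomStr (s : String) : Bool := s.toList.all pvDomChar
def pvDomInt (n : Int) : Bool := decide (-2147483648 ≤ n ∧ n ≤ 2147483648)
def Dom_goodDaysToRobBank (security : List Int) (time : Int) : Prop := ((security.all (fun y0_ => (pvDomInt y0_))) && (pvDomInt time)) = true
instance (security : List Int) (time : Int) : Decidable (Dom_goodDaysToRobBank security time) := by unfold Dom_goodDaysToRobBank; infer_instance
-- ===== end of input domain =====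

-- B replaces A's precomputed prefix/suffix run-length tables by a direct per-day scan of the two
-- length-`time` windows (objective: simpler).


-- ===== PORT A =====
def goodDaysToRobBank (security : List Int) (time : Int) : List Int :=
  let n := security.length
  let left0 := List.replicate n (0 : Int)
  let right0 := List.replicate n (0 : Int)
  let left := (PySem.List.pyRange 1 (n : Int) 1).foldl (fun L i =>
      if PySem.List.pyGetD security i 0 ≤ PySem.List.pyGetD security (i - 1) 0 then
        L.set i.toNat (PySem.List.pyGetD L (i - 1) 0 + 1)
      else L) left0
  let right := (PySem.List.pyRange ((n : Int) - 2) (-1) (-1)).foldl (fun R i =>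
      if PySem.List.pyGetD security i 0 ≤ PySem.List.pyGetD security (i + 1) 0 then
        R.set i.toNat (PySem.List.pyGetD R (i + 1) 0 + 1)
      else R) right0
  (PySem.List.pyRange 0 (n : Int) 1).filter (fun i =>
      decide (time ≤ PySem.List.pyGetD left i 0) && decide (time ≤ PySem.List.pyGetD right i 0))

-- ===== PORT B =====
def goodDaysToRobBank_alt (security : List Int) (time : Int) : List Int :=
  let n := security.length
  if time ≤ 0 then PySem.List.pyRange 0 (n : Int) 1
  else (PySem.List.pyRange time ((n : Int) - time) 1).filter (fun i =>
      ((PySem.List.pyRange (i - time + 1) (i + 1) 1).all fun j =>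
        decide (PySem.List.pyGetD security j 0 ≤ PySem.List.pyGetD security (j - 1) 0))
      && ((PySem.List.pyRange i (i + time) 1).all fun j =>
        decide (PySem.List.pyGetD security j 0 ≤ PySem.List.pyGetD security (j + 1) 0)))

-- ===== PRECONDITION & SPEC =====
def Spec_goodDaysToRobBank (security : List Int) (time : Int) (out : List Int) : Prop := out = goodDaysToRobBank_alt security time
instance (security : List Int) (time : Int) (out : List Int) : Decidable (Spec_goodDaysToRobBank security time out) := by unfold Spec_goodDaysToRobBank; infer_instance

-- ===== CLAIM (what is proved, stated in full; the proofs are below) =====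
def Claim_equal_goodDaysToRobBank : Prop := ∀ (security : List Int) (time : Int), Dom_goodDaysToRobBank security time → Spec_goodDaysToRobBank security time (goodDaysToRobBank security time)

-- ===== LEMMAS AND PROOFS =====

-- A's left table as a recursive function of the index.
def leftF (s : List Int) : Nat → Int
  | 0 => 0
  | i + 1 => if s.getD (i + 1) 0 ≤ s.getD i 0 then leftF s i + 1 else 0

-- A's right table as a recursive function of the index.
def rightF (s : List Int) (i : Nat) : Int :=
  if h : i + 1 < s.length then
    (if s.getD i 0 ≤ s.getD (i + 1) 0 then rightF s (i + 1) + 1 else 0)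
  else 0
termination_by s.length - i

lemma leftF_nonneg (s : List Int) (i : Nat) : 0 ≤ leftF s i := by
  induction i with
  | zero => simp [leftF]
  | succ i ih => simp only [leftF]; split <;> omega

lemma rightF_nonneg (s : List Int) (i : Nat) : 0 ≤ rightF s i := by
  unfold rightF
  split
  · split
    · have := rightF_nonneg s (i + 1); omega
    · omega
  · omega
termination_by s.length - i

lemma pyRange_one_nil (a b : Int) (h : b ≤ a) : PySem.List.pyRange a b 1 = [] := by
  simp only [PySem.List.pyRange]
  norm_num
  omega

lemma pyRange_neg_nil (a : Int) (h : a ≤ -1) : PySem.List.pyRange a (-1) (-1) = [] := by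
  simp only [PySem.List.pyRange]
  norm_num
  omega
lemma pyRange_neg_eq (k : Nat) :
    PySem.List.pyRange (k : Int) (-1) (-1) = (List.range (k + 1)).map (fun j => (k : Int) - (j : Int)) := by
  simp only [PySem.List.pyRange]
  norm_num
  rw [if_pos (by omega : (-1 : Int) < (k : Int))]
  rw [← List.map_eq_flatMap, List.map_map]
  apply List.map_congr_left
  intro j _
  simp only [Function.comp]
  ring
lemma pyRange_neg_cons (k : Nat) :
    PySem.List.pyRange (k : Int) (-1) (-1) = (k : Int) :: PySem.List.pyRange ((k : Int) - 1) (-1) (-1) := by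
  cases k with
  | zero =>
      have : ((0 : Nat) : Int) - 1 = -1 := by norm_num
      rw [pyRange_neg_eq 0, this, pyRange_neg_nil (-1) (by norm_num)]
      simp
  | succ k =>
      have e1 : ((k + 1 : Nat) : Int) - 1 = (k : Int) := by push_cast; ring
      rw [pyRange_neg_eq (k + 1), e1, pyRange_neg_eq k, List.range_succ_eq_map]
      simp only [List.pure_def, List.bind_eq_flatMap, ← List.map_eq_flatMap, List.map_map, List.map_cons]
      refine List.cons_eq_cons.mpr ⟨by push_cast; ring, ?_⟩
      apply List.map_congr_left
      intro j _
      simp only [Function.comp_apply, Nat.succ_eq_add_one]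
      push_cast
      ring

-- half-open increasing range as a shifted List.range
lemma pyRange_one_map (a : Int) (l : Nat) :
    PySem.List.pyRange a (a + l) 1 = (List.range l).map (fun k : Nat => a + (k : Int)) := by
  induction l with
  | zero => simp [PySem.List.pyRange]
  | succ l ih =>
      have h : a ≤ a + (l : Int) := by omega
      have : (a + ((l : Nat) + 1 : Nat) : Int) = (a + l) + 1 := by push_cast; ring
      rw [this, PySem.List.pyRange_one_succ_right h, ih, List.range_succ]
      simp

-- the left fold computes leftF
lemma left_fold_spec (s : List Int) (m : Nat) (hm : m ≤ s.length) :
    (((PySem.List.pyRange 1 (m : Int) 1).foldl (fun L i =>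
        if PySem.List.pyGetD s i 0 ≤ PySem.List.pyGetD s (i - 1) 0 then
          L.set i.toNat (PySem.List.pyGetD L (i - 1) 0 + 1)
        else L) (List.replicate s.length (0 : Int))).length = s.length)
    ∧ ∀ i < s.length,
      (((PySem.List.pyRange 1 (m : Int) 1).foldl (fun L i =>
        if PySem.List.pyGetD s i 0 ≤ PySem.List.pyGetD s (i - 1) 0 then
          L.set i.toNat (PySem.List.pyGetD L (i - 1) 0 + 1)
        else L) (List.replicate s.length (0 : Int))).getD i 0)
      = if i < m then leftF s i else 0 := by
  induction m with
  | zero =>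
      push_cast
      rw [pyRange_one_nil 1 0 (by norm_num)]
      refine ⟨by simp, ?_⟩
      intro i hi
      simp only [List.foldl_nil]
      rw [List.getD_replicate 0 hi]
      simp
  | succ m ih =>
      cases m with
      | zero =>
          push_cast
          rw [pyRange_one_nil 1 1 (le_refl _)]
          refine ⟨by simp, ?_⟩
          intro i hi
          simp only [List.foldl_nil]
          rw [List.getD_replicate 0 hi]
          rcases Nat.lt_or_ge i 1 with h | h
          · interval_cases i
            simp [leftF]
          · simp [Nat.not_lt.mpr h]
      | succ m' =>
          have hm' : m' + 1 ≤ s.length := by omega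
          obtain ⟨ihlen, ihval⟩ := ih hm'
          have hcast : ((m' + 1 + 1 : Nat) : Int) = ((m' + 1 : Nat) : Int) + 1 := by push_cast; ring
          rw [hcast, PySem.List.pyRange_one_succ_right (by push_cast; omega), List.foldl_append]
          set L := ((PySem.List.pyRange 1 ((m' + 1 : Nat) : Int) 1).foldl (fun L i =>
            if PySem.List.pyGetD s i 0 ≤ PySem.List.pyGetD s (i - 1) 0 then
              L.set i.toNat (PySem.List.pyGetD L (i - 1) 0 + 1)
            else L) (List.replicate s.length (0 : Int))) with hL
          simp only [List.foldl_cons, List.foldl_nil]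
          have em1 : (((m' + 1 : Nat) : Int) - 1) = ((m' : Nat) : Int) := by push_cast; ring
          rw [em1, PySem.List.pyGetD_natCast s (m' + 1) 0, PySem.List.pyGetD_natCast s m' 0,
              PySem.List.pyGetD_natCast L m' 0]
          have hLm' : L.getD m' 0 = leftF s m' := by
            rw [ihval m' (by omega)]
            simp
          split
          · rename_i hc
            have hlen2 : (L.set (((m' + 1 : Nat) : Int)).toNat (L.getD m' 0 + 1)).length = s.length := by
              simp [ihlen]
            refine ⟨hlen2, ?_⟩
            intro i hi
            rw [Int.toNat_natCast]
            rcases eq_or_ne i (m' + 1) with rfl | hne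
            · rw [List.getD_eq_getElem?_getD, List.getElem?_set_self (by omega), Option.getD_some,
                  hLm']
              rw [if_pos (by omega)]
              simp only [leftF]
              rw [if_pos hc]
            · rw [List.getD_eq_getElem?_getD, List.getElem?_set_ne (by omega),
                  ← List.getD_eq_getElem?_getD, ihval i hi]
              rcases Nat.lt_or_ge i (m' + 1 + 1) with h | h
              · rw [if_pos (by omega), if_pos h]
              · rw [if_neg (by omega), if_neg (by omega)]
          · rename_i hc
            refine ⟨ihlen, ?_⟩
            intro i hi
            rw [ihval i hi]
            rcases eq_or_ne i (m' + 1) with rfl | hne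
            · rw [if_neg (by omega), if_pos (by omega)]
              simp only [leftF]
              rw [if_neg hc]
            · rcases Nat.lt_or_ge i (m' + 1 + 1) with h | h
              · rw [if_pos (by omega), if_pos h]
              · rw [if_neg (by omega), if_neg (by omega)]

lemma rightF_eq_of_lt (s : List Int) (j : Nat) (h : j + 1 < s.length) :
    rightF s j = if s.getD j 0 ≤ s.getD (j + 1) 0 then rightF s (j + 1) + 1 else 0 := by
  rw [rightF]
  simp [h]

lemma rightF_eq_of_ge (s : List Int) (j : Nat) (h : s.length ≤ j + 1) : rightF s j = 0 := by
  rw [rightF]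
  simp [Nat.not_lt.mpr h]

-- one step of A's right loop at index j
lemma right_step (s R : List Int) (j : Nat) (hlen : R.length = s.length) (hj : j + 2 ≤ s.length)
    (hnext : R.getD (j + 1) 0 = rightF s (j + 1)) (hself : R.getD j 0 = 0) :
    ∀ i < s.length,
      ((if PySem.List.pyGetD s (j : Int) 0 ≤ PySem.List.pyGetD s ((j : Int) + 1) 0 then
          R.set ((j : Int)).toNat (PySem.List.pyGetD R ((j : Int) + 1) 0 + 1)
        else R)).getD i 0 = if i = j then rightF s j else R.getD i 0 := by
  intro i hi
  rw [show ((j : Int) + 1) = ((j + 1 : Nat) : Int) by push_cast; ring,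
      PySem.List.pyGetD_natCast s j 0, PySem.List.pyGetD_natCast s (j + 1) 0,
      PySem.List.pyGetD_natCast R (j + 1) 0, Int.toNat_natCast, hnext,
      rightF_eq_of_lt s j (by omega)]
  split
  · rename_i hc
    rcases eq_or_ne i j with rfl | hne
    · rw [List.getD_eq_getElem?_getD, List.getElem?_set_self (by omega), Option.getD_some, if_pos rfl]
    · rw [List.getD_eq_getElem?_getD, List.getElem?_set_ne (by omega), ← List.getD_eq_getElem?_getD,
          if_neg hne]
  · rename_i hc
    rcases eq_or_ne i j with rfl | hne
    · rw [if_pos rfl]; exact hself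
    · rw [if_neg hne]

lemma right_step_length (s R : List Int) (j : Nat) :
    ((if PySem.List.pyGetD s (j : Int) 0 ≤ PySem.List.pyGetD s ((j : Int) + 1) 0 then
        R.set ((j : Int)).toNat (PySem.List.pyGetD R ((j : Int) + 1) 0 + 1)
      else R)).length = R.length := by
  split <;> simp

lemma right_fold_inv (s : List Int) (k : Nat) :
    ∀ (R : List Int), R.length = s.length → k + 2 ≤ s.length →
    (∀ i < s.length, R.getD i 0 = if k < i then rightF s i else 0) →
    ∀ i < s.length,
      ((PySem.List.pyRange (k : Int) (-1) (-1)).foldl (fun R i =>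
        if PySem.List.pyGetD s i 0 ≤ PySem.List.pyGetD s (i + 1) 0 then
          R.set i.toNat (PySem.List.pyGetD R (i + 1) 0 + 1)
        else R) R).getD i 0 = rightF s i := by
  induction k with
  | zero =>
      intro R hlen hk hR i hi
      rw [pyRange_neg_cons 0, show ((0 : Nat) : Int) - 1 = -1 by norm_num,
          pyRange_neg_nil (-1) (le_refl _)]
      simp only [List.foldl_cons, List.foldl_nil]
      rw [right_step s R 0 hlen (by omega) (by rw [hR 1 (by omega)]; simp)
            (by rw [hR 0 (by omega)]; simp) i hi]
      rcases eq_or_ne i 0 with rfl | hne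
      · rw [if_pos rfl]
      · rw [if_neg hne, hR i hi, if_pos (by omega)]
  | succ k ih =>
      intro R hlen hk hR i hi
      rw [pyRange_neg_cons (k + 1), show ((k + 1 : Nat) : Int) - 1 = ((k : Nat) : Int) by push_cast; ring]
      simp only [List.foldl_cons]
      apply ih
      · rw [right_step_length, hlen]
      · omega
      · intro i' hi'
        rw [right_step s R (k + 1) hlen (by omega)
              (by rw [hR (k + 2) (by omega), if_pos (by omega)])
              (by rw [hR (k + 1) (by omega), if_neg (by omega)]) i' hi']
        rcases eq_or_ne i' (k + 1) with rfl | hne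
        · rw [if_pos rfl, if_pos (by omega)]
        · rw [if_neg hne, hR i' hi']
          rcases Nat.lt_or_ge k i' with h | h
          · rw [if_pos h, if_pos (by omega)]
          · rw [if_neg (by omega), if_neg (by omega)]
      · exact hi

-- the right fold computes rightF
lemma right_fold_spec (s : List Int) :
    ∀ i < s.length,
      (((PySem.List.pyRange ((s.length : Int) - 2) (-1) (-1)).foldl (fun R i =>
        if PySem.List.pyGetD s i 0 ≤ PySem.List.pyGetD s (i + 1) 0 then
          R.set i.toNat (PySem.List.pyGetD R (i + 1) 0 + 1)
        else R) (List.replicate s.length (0 : Int))).getD i 0)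
      = rightF s i := by
  intro i hi
  rcases Nat.lt_or_ge s.length 2 with h2 | h2
  · rw [pyRange_neg_nil ((s.length : Int) - 2) (by omega)]
    simp only [List.foldl_nil]
    rw [List.getD_replicate 0 hi, rightF_eq_of_ge s i (by omega)]
  · rw [show ((s.length : Int) - 2) = ((s.length - 2 : Nat) : Int) by omega]
    apply right_fold_inv s (s.length - 2) _ (by simp) (by omega) _ i hi
    intro i' hi'
    rw [List.getD_replicate 0 hi']
    rcases Nat.lt_or_ge (s.length - 2) i' with h | h
    · rw [if_pos h, rightF_eq_of_ge s i' (by omega)]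
    · rw [if_neg (by omega)]

lemma leftF_ge_iff (s : List Int) (t i : Nat) :
    ((t : Int) ≤ leftF s i) ↔ (t ≤ i ∧ ∀ k < t, s.getD (i - k) 0 ≤ s.getD (i - k - 1) 0) := by
  induction i generalizing t with
  | zero =>
      cases t with
      | zero => simp [leftF]
      | succ t => simp [leftF]
  | succ i ih =>
      cases t with
      | zero =>
          refine ⟨fun _ => ⟨Nat.zero_le _, by omega⟩, fun _ => leftF_nonneg s (i + 1)⟩
      | succ t =>
          simp only [leftF]
          split
          · rename_i hc
            have : ((t + 1 : Nat) : Int) ≤ leftF s i + 1 ↔ ((t : Nat) : Int) ≤ leftF s i := by push_cast; omega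
            rw [this, ih t]
            constructor
            · rintro ⟨h1, h2⟩
              refine ⟨by omega, ?_⟩
              intro k hk
              cases k with
              | zero => simpa using hc
              | succ k => have := h2 k (by omega); simpa [Nat.succ_sub_succ] using this
            · rintro ⟨h1, h2⟩
              refine ⟨by omega, ?_⟩
              intro k hk
              have := h2 (k + 1) (by omega)
              simpa [Nat.succ_sub_succ] using this
          · rename_i hc
            constructor
            · intro h; exfalso; omega
            · rintro ⟨h1, h2⟩
              exact absurd (by simpa using h2 0 (by omega)) hc

lemma rightF_ge_iff (s : List Int) (t i : Nat) (hi : i < s.length) :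
    ((t : Int) ≤ rightF s i) ↔
      (i + t ≤ s.length - 1 ∧ ∀ k < t, s.getD (i + k) 0 ≤ s.getD (i + k + 1) 0) := by
  rcases Nat.lt_or_ge (i + 1) s.length with h | h
  · rw [rightF_eq_of_lt s i h]
    split
    · rename_i hc
      cases t with
      | zero =>
          simp only [Nat.cast_zero, Nat.add_zero]
          constructor
          · intro _; exact ⟨by omega, by omega⟩
          · intro _; have := rightF_nonneg s (i + 1); omega
      | succ t =>
          have key := rightF_ge_iff s t (i + 1) (by omega)
          constructor
          · intro hle
            have ht : ((t : Nat) : Int) ≤ rightF s (i + 1) := by push_cast at hle ⊢; omega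
            obtain ⟨h1, h2⟩ := key.mp ht
            refine ⟨by omega, ?_⟩
            intro k hk
            cases k with
            | zero => simpa using hc
            | succ k =>
                have := h2 k (by omega)
                have e : i + (k + 1) = i + 1 + k := by omega
                rw [e]
                have e2 : i + 1 + k + 1 = i + 1 + k + 1 := rfl
                exact this
          · rintro ⟨h1, h2⟩
            have h2' : ∀ k < t, s.getD (i + 1 + k) 0 ≤ s.getD (i + 1 + k + 1) 0 := by
              intro k hk
              have := h2 (k + 1) (by omega)
              have e : i + (k + 1) = i + 1 + k := by omega
              rwa [e] at this
            have := key.mpr ⟨by omega, h2'⟩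
            push_cast at this ⊢
            omega
    · rename_i hc
      cases t with
      | zero =>
          simp only [Nat.cast_zero, Nat.add_zero]
          exact ⟨fun _ => ⟨by omega, by omega⟩, fun _ => le_refl 0⟩
      | succ t =>
          constructor
          · intro hle; exfalso; push_cast at hle; omega
          · rintro ⟨h1, h2⟩
            exact absurd (by simpa using h2 0 (by omega)) hc
  · rw [rightF_eq_of_ge s i h]
    have hi1 : i = s.length - 1 := by omega
    cases t with
    | zero =>
        simp only [Nat.cast_zero, Nat.add_zero]
        exact ⟨fun _ => ⟨by omega, by omega⟩, fun _ => le_refl 0⟩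
    | succ t =>
        constructor
        · intro hle; exfalso; push_cast at hle; omega
        · rintro ⟨h1, h2⟩; exfalso; omega
termination_by s.length - i

-- reindexing a backward window as a forward window
lemma window_reindex (t i : Nat) (ht : t ≤ i) (P : Nat → Nat → Prop) :
    (∀ k < t, P (i - k) (i - k - 1)) ↔ (∀ k < t, P (i - t + 1 + k) (i - t + k)) := by
  constructor
  · intro h k hk
    have e1 : i - (t - 1 - k) = i - t + 1 + k := by omega
    have e2 : i - (t - 1 - k) - 1 = i - t + k := by omega
    have := h (t - 1 - k) (by omega)
    rwa [e2, e1] at this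
  · intro h k hk
    have e1 : i - t + 1 + (t - 1 - k) = i - k := by omega
    have e2 : i - t + (t - 1 - k) = i - k - 1 := by omega
    have := h (t - 1 - k) (by omega)
    rwa [e2, e1] at this

lemma all_rangeMap (a : Int) (l : Nat) (p : Int → Bool) :
    ((List.range l).map (fun k : Nat => a + (k : Int))).all p = true ↔ ∀ k < l, p (a + (k : Int)) = true := by
  simp [List.all_eq_true]

lemma filter_three (p : Nat → Bool) (xs ys zs : List Nat)
    (hx : ∀ a ∈ xs, ¬ p a = true) (hz : ∀ a ∈ zs, ¬ p a = true) :
    List.filter p (xs ++ (ys ++ zs)) = List.filter p ys := by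
  rw [List.filter_append, List.filter_append, List.filter_eq_nil_iff.mpr hx,
      List.filter_eq_nil_iff.mpr hz, List.nil_append, List.append_nil]

-- pointwise agreement of the two filter predicates on the middle segment
lemma middle_pointwise (s : List Int) (t i : Nat) (ht1 : 1 ≤ t) (hti : t ≤ i)
    (hin : i + t < s.length) :
    (decide (((t : Nat) : Int) ≤ leftF s i) && decide (((t : Nat) : Int) ≤ rightF s i))
    = (((PySem.List.pyRange ((i : Int) - (t : Int) + 1) ((i : Int) + 1) 1).all fun j =>
        decide (PySem.List.pyGetD s j 0 ≤ PySem.List.pyGetD s (j - 1) 0))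
      && ((PySem.List.pyRange (i : Int) ((i : Int) + (t : Int)) 1).all fun j =>
        decide (PySem.List.pyGetD s j 0 ≤ PySem.List.pyGetD s (j + 1) 0))) := by
  have e1 : ((i : Int) - (t : Int) + 1) = ((i - t + 1 : Nat) : Int) := by omega
  have e2 : ((i : Int) + 1) = ((i - t + 1 : Nat) : Int) + ((t : Nat) : Int) := by omega
  rw [e1, e2, pyRange_one_map, pyRange_one_map]
  rw [Bool.eq_iff_iff, Bool.and_eq_true, Bool.and_eq_true, all_rangeMap, all_rangeMap]
  simp only [decide_eq_true_eq]
  rw [leftF_ge_iff s t i, rightF_ge_iff s t i (by omega)]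
  have eL : ∀ k, k < t → ((((i - t + 1 : Nat) : Int) + (k : Int)) = ((i - t + 1 + k : Nat) : Int)
      ∧ (((i - t + 1 + k : Nat) : Int) - 1) = ((i - t + k : Nat) : Int)) := by
    intro k hk; constructor <;> omega
  have eR : ∀ k, k < t → (((i : Int) + (k : Int)) = ((i + k : Nat) : Int)
      ∧ (((i + k : Nat) : Int) + 1) = ((i + k + 1 : Nat) : Int)) := by
    intro k hk; constructor <;> omega
  constructor
  · rintro ⟨⟨_, hL⟩, ⟨_, hR⟩⟩
    have hL' := (window_reindex t i hti (fun a b => s.getD a 0 ≤ s.getD b 0)).mp hL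
    constructor
    · intro k hk
      obtain ⟨ea, eb⟩ := eL k hk
      rw [ea, eb, PySem.List.pyGetD_natCast, PySem.List.pyGetD_natCast]
      exact hL' k hk
    · intro k hk
      obtain ⟨ea, eb⟩ := eR k hk
      rw [ea, eb, PySem.List.pyGetD_natCast, PySem.List.pyGetD_natCast]
      exact hR k hk
  · rintro ⟨hL, hR⟩
    refine ⟨⟨hti, ?_⟩, ⟨by omega, ?_⟩⟩
    · apply (window_reindex t i hti (fun a b => s.getD a 0 ≤ s.getD b 0)).mpr
      intro k hk
      obtain ⟨ea, eb⟩ := eL k hk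
      have := hL k hk
      rwa [ea, eb, PySem.List.pyGetD_natCast, PySem.List.pyGetD_natCast] at this
    · intro k hk
      obtain ⟨ea, eb⟩ := eR k hk
      have := hR k hk
      rwa [ea, eb, PySem.List.pyGetD_natCast, PySem.List.pyGetD_natCast] at this

-- ===== VERDICT (by name: the statement is the Claim_ definition above) =====
theorem goodDaysToRobBank_spec : Claim_equal_goodDaysToRobBank := by
  intro s time _
  simp only [Spec_goodDaysToRobBank, goodDaysToRobBank, goodDaysToRobBank_alt]
  have hA := (left_fold_spec s s.length (le_refl _)).2
  have hB := right_fold_spec s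
  rw [PySem.List.pyRange_zero_natCast s.length, List.filter_map]
  by_cases ht : time ≤ 0
  · rw [if_pos ht]
    rw [List.filter_eq_self.mpr ?_]
    intro i hi
    rw [List.mem_range] at hi
    simp only [Function.comp_apply]
    rw [PySem.List.pyGetD_natCast, PySem.List.pyGetD_natCast, hA i hi, if_pos hi, hB i hi]
    simp only [Bool.and_eq_true, decide_eq_true_eq]
    exact ⟨le_trans ht (leftF_nonneg s i), le_trans ht (rightF_nonneg s i)⟩
  · rw [if_neg ht]
    obtain ⟨t, rfl⟩ : ∃ t : Nat, time = (t : Int) :=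
      ⟨time.toNat, (Int.toNat_of_nonneg (by omega)).symm⟩
    have ht1 : 1 ≤ t := by omega
    rcases Nat.lt_or_ge s.length (2 * t) with h2 | h2
    · rw [pyRange_one_nil ((t : Nat) : Int) ((s.length : Int) - ((t : Nat) : Int)) (by omega), List.filter_nil]
      rw [List.filter_eq_nil_iff.mpr ?_, List.map_nil]
      intro i hi
      rw [List.mem_range] at hi
      simp only [Function.comp_apply]
      rw [PySem.List.pyGetD_natCast, PySem.List.pyGetD_natCast, hA i hi, if_pos hi, hB i hi]
      simp only [Bool.and_eq_true, decide_eq_true_eq, not_and]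
      intro hl hr
      rw [leftF_ge_iff] at hl
      rw [rightF_ge_iff s t i hi] at hr
      omega
    · rw [show ((s.length : Int) - (t : Int)) = ((t : Nat) : Int) + ((s.length - 2 * t : Nat) : Int) by omega,
          pyRange_one_map]
      rw [show (List.range (s.length - 2 * t)).map (fun k : Nat => ((t : Nat) : Int) + (k : Int))
            = ((List.range (s.length - 2 * t)).map (fun k => t + k)).map (fun j : Nat => (j : Int)) by
          rw [List.map_map]; apply List.map_congr_left; intro k _; simp]
      rw [List.filter_map]
      apply congrArg
      rw [show (List.range (s.length - 2 * t)).map (fun k => t + k) = List.range' t (s.length - 2 * t) from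
            List.range'_eq_map_range.symm]
      have hsplit : List.range s.length
          = List.range' 0 t ++ (List.range' (0 + t) (s.length - 2 * t)
              ++ List.range' (0 + t + (s.length - 2 * t)) t) := by
        rw [List.range'_append_1, List.range'_append_1, List.range_eq_range']
        congr 1
        omega
      simp only [Nat.zero_add] at hsplit
      rw [hsplit, filter_three _ _ _ _ ?hx ?hz]
      case hx =>
        intro i hi
        rw [List.mem_range'_1] at hi
        simp only [Function.comp_apply]
        rw [PySem.List.pyGetD_natCast, PySem.List.pyGetD_natCast, hA i (by omega), if_pos (by omega),
            hB i (by omega)]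
        simp only [Bool.and_eq_true, decide_eq_true_eq, not_and]
        intro hl _
        rw [leftF_ge_iff] at hl
        omega
      case hz =>
        intro i hi
        rw [List.mem_range'_1] at hi
        simp only [Function.comp_apply]
        rw [PySem.List.pyGetD_natCast, PySem.List.pyGetD_natCast, hA i (by omega), if_pos (by omega),
            hB i (by omega)]
        simp only [Bool.and_eq_true, decide_eq_true_eq, not_and]
        intro _ hr
        rw [rightF_ge_iff s t i (by omega)] at hr
        omega
      apply List.filter_congr
      intro i hi
      rw [List.mem_range'_1] at hi
      simp only [Function.comp_apply]
      rw [PySem.List.pyGetD_natCast, PySem.List.pyGetD_natCast, hA i (by omega), if_pos (by omega),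
          hB i (by omega)]
      exact middle_pointwise s t i ht1 (by omega) (by omega)
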